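-- pv_equiv track=rewrite | github.com/brantmerrell/codility | reading/stacks.py | grocery_store
-- ===== SOURCE A (Python) =====
-- def grocery_store(arr_a):
--     """Model Solution - O(n)"""
--     len_n = len(arr_a)
--     local_size, result = 0, 0
--     for ndx_j in range(len_n):
--         if arr_a[ndx_j] == 0:
--             local_size += 1
--         else:
--             local_size -= 1
--             result = max(result, -local_size)
--     return result
-- ===== SOURCE B (Python) =====
-- def grocery_store(arr_a):
--     """Right-to-left suffix recurrence: 'need' is the max deficit reachable in the
--     suffix being scanned; prepending an element x turns need into max(0, need - delta(x))."""
--     need = 0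
--     for x in reversed(arr_a):
--         need = max(0, need - (1 if x == 0 else -1))
--     return need
-- ===== Notes on version B (the rewrite author's own statement) =====
-- stated objective: alternative
-- what changed: Replaces A's left-to-right running-balance loop with a running max by a right-to-left suffix recurrence: scanning from the end, need = max(0, need - delta(x)) computes the maximum deficit directly, no balance or prefix sums maintained.
import Mathlib
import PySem

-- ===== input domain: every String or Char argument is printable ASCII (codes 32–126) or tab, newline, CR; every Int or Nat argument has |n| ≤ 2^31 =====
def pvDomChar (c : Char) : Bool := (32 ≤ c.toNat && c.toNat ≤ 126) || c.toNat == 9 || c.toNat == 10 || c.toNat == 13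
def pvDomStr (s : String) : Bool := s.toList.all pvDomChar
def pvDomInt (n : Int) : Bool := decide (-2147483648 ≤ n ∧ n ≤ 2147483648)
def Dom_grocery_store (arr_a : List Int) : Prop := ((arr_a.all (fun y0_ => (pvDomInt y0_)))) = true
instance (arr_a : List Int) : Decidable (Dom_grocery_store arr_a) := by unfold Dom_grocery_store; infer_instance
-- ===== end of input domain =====

-- B replaces A's left-to-right running-balance-with-max loop by a right-to-left
-- suffix recurrence (need = max 0 (need - delta)); same O(n) cost, different traversal.


-- ===== PORT A =====
-- literal port of A's index loop; arr_a[ndx_j] is always in range, ported as pyGetD (default never used)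
def grocery_store (arr_a : List Int) : Int :=
  let len_n : Int := (arr_a.length : Int)
  let st := (PySem.List.pyRange 0 len_n 1).foldl
    (fun (acc : Int × Int) (ndx_j : Int) =>
      if PySem.List.pyGetD arr_a ndx_j 0 = 0 then (acc.1 + 1, acc.2)
      else (acc.1 - 1, max acc.2 (-(acc.1 - 1)))) (0, 0)
  st.2

-- ===== PORT B =====
-- Source B's reversed(arr_a) loop: a foldl over the reversed list carrying 'need'
def grocery_store_alt (arr_a : List Int) : Int :=
  arr_a.reverse.foldl
    (fun (need : Int) (x : Int) => max 0 (need - (if x = 0 then 1 else -1))) 0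

-- ===== PRECONDITION & SPEC =====
def Spec_grocery_store (arr_a : List Int) (out : Int) : Prop := out = grocery_store_alt arr_a
instance (arr_a : List Int) (out : Int) : Decidable (Spec_grocery_store arr_a out) := by unfold Spec_grocery_store; infer_instance

-- ===== CLAIM (what is proved, stated in full; the proofs are below) =====
def Claim_equal_grocery_store : Prop := ∀ (arr_a : List Int), Dom_grocery_store arr_a → Spec_grocery_store arr_a (grocery_store arr_a)

-- ===== LEMMAS AND PROOFS =====

-- abstract prefix-balance list starting at balance s
def pvPf (s : Int) : List Int → List Int
  | [] => []
  | x :: t => let s' := s + (if x = 0 then 1 else -1); s' :: pvPf s' t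

def pvStepA (acc : Int × Int) (x : Int) : Int × Int :=
  if x = 0 then (acc.1 + 1, acc.2) else (acc.1 - 1, max acc.2 (-(acc.1 - 1)))

-- B as a structural right fold (foldl over the reverse)
def pvB : List Int → Int
  | [] => 0
  | x :: t => max 0 (pvB t - (if x = 0 then 1 else -1))

lemma pvB_nonneg (arr : List Int) : 0 ≤ pvB arr := by
  cases arr with
  | nil => simp [pvB]
  | cons x t => simp [pvB]

lemma pvAlt_eq_pvB (arr : List Int) : grocery_store_alt arr = pvB arr := by
  unfold grocery_store_alt
  rw [List.foldl_reverse]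
  induction arr with
  | nil => simp [pvB]
  | cons x t ih => simp [pvB, ← ih]

lemma pvA_eq_maxfold (arr : List Int) :
    ∀ (s r : Int), 0 ≤ r → -s ≤ r →
      (arr.foldl pvStepA (s, r)).2
        = (pvPf s arr).foldl (fun m p => max m (-p)) r := by
  induction arr with
  | nil => intro s r _ _; simp [pvPf]
  | cons x t ih =>
      intro s r hr hs
      by_cases hx : x = 0
      · simp only [List.foldl_cons, pvStepA, hx, if_true, pvPf]
        rw [ih (s + 1) r hr (by omega)]
        congr 1
        omega
      · simp only [List.foldl_cons, pvStepA, hx, if_false, pvPf]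
        rw [ih (s - 1) (max r (-(s - 1))) (by omega) (by omega)]
        congr 1

-- the max-deficit fold over the prefix-balance list equals the suffix recurrence
lemma pvMaxfold_eq_pvB (arr : List Int) :
    ∀ (s r : Int), -s ≤ r →
      (pvPf s arr).foldl (fun m p => max m (-p)) r = max r (pvB arr - s) := by
  induction arr with
  | nil => intro s r h; simp [pvPf, pvB]; omega
  | cons x t ih =>
      intro s r h
      simp only [pvPf, List.foldl_cons, pvB]
      rw [ih (s + (if x = 0 then 1 else -1)) (max r (-(s + (if x = 0 then 1 else -1)))) (by omega)]
      have hb := pvB_nonneg t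
      by_cases hx : x = 0 <;> simp [hx] <;> omega

-- ===== VERDICT (by name: the statement is the Claim_ definition above) =====
theorem grocery_store_spec : Claim_equal_grocery_store := by
  intro arr _
  show grocery_store arr = grocery_store_alt arr
  show (List.foldl (fun (acc : Int × Int) (j : Int) => pvStepA acc (PySem.List.pyGetD arr j 0))
          (0, 0) (PySem.List.pyRange 0 (arr.length : Int) 1)).2 = grocery_store_alt arr
  rw [PySem.List.foldl_pyRange_zero_pyGetD' arr 0 pvStepA (0, 0)]
  rw [pvA_eq_maxfold arr 0 0 le_rfl (by omega)]
  rw [pvMaxfold_eq_pvB arr 0 0 (by omega)]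
  rw [pvAlt_eq_pvB arr]
  have := pvB_nonneg arr
  omega
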